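-- pv_equiv track=rewrite | github.com/giovannidesisto/sonicGameGearToAtariLynx | resources/map_compressor/compressor.py | flatten_rle
-- ===== SOURCE A (Python) =====
-- def flatten_rle(rle_list):
--     offs = []
--     data = []
--     offset = 0
--
--     for rle in rle_list:
--         offs.append(offset)
--         for v, cnt in rle:
--             data.append(v)
--             data.append(cnt)
--             offset += 2
--
--     return offs, data
-- ===== SOURCE B (Python) =====
-- from itertools import accumulate
--
-- def flatten_rle(rle_list):
--     lens = [2 * len(rle) for rle in rle_list]
--     offs = list(accumulate(lens, initial=0))[:-1]
--     data = [x for rle in rle_list for v, cnt in rle for x in (v, cnt)]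
--     return offs, data
-- ===== Notes on version B (the rewrite author's own statement) =====
-- stated objective: idiomatic
-- what changed: Replaced the single coupled loop that threads a running offset with two independent passes: offsets as a prefix sum (itertools.accumulate) over doubled sublist lengths, and data as one flattening comprehension.
import Mathlib
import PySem

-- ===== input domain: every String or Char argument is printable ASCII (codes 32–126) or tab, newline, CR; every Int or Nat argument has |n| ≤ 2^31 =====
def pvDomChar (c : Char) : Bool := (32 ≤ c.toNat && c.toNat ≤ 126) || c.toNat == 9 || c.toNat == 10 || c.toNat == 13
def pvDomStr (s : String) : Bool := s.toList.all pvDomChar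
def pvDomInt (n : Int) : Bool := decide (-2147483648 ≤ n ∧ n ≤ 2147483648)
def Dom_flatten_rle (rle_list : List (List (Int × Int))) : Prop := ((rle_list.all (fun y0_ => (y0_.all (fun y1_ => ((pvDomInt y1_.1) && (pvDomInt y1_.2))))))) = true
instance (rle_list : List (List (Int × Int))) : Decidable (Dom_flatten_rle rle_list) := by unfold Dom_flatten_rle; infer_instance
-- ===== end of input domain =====

-- B replaces A's single offset-threading loop by two independent passes (prefix sums of lengths; one flattening); same cost, more idiomatic.

-- ===== PORT A =====
-- literal port of A: one fold over rle_list threading (offs, data, offset)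
def flatten_rle (rle_list : List (List (Int × Int))) : List Int × List Int :=
  let st := rle_list.foldl
    (fun (st : List Int × List Int × Int) rle =>
      let offs := st.1 ++ [st.2.2]
      let inner := rle.foldl
        (fun (p : List Int × Int) vc => (p.1 ++ [vc.1] ++ [vc.2], p.2 + 2))
        (st.2.1, st.2.2)
      (offs, inner.1, inner.2))
    ([], [], 0)
  (st.1, st.2.1)

-- ===== PORT B =====
-- literal port of Source B: lens pass, accumulate-with-initial-0 then drop last (scanl/dropLast), flatten pass
def flatten_rle_alt (rle_list : List (List (Int × Int))) : List Int × List Int :=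
  let lens := rle_list.map (fun rle => 2 * (rle.length : Int))
  let offs := (lens.scanl (· + ·) 0).dropLast
  let data := rle_list.flatMap (fun rle => rle.flatMap (fun vc => [vc.1, vc.2]))
  (offs, data)

-- ===== PRECONDITION & SPEC =====
def Spec_flatten_rle (rle_list : List (List (Int × Int))) (out : List Int × List Int) : Prop := out = flatten_rle_alt rle_list
instance (rle_list : List (List (Int × Int))) (out : List Int × List Int) : Decidable (Spec_flatten_rle rle_list out) := by unfold Spec_flatten_rle; infer_instance

-- ===== CLAIM (what is proved, stated in full; the proofs are below) =====
def Claim_equal_flatten_rle : Prop := ∀ (rle_list : List (List (Int × Int))), Dom_flatten_rle rle_list → Spec_flatten_rle rle_list (flatten_rle rle_list)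

-- ===== LEMMAS AND PROOFS =====

theorem inner_fold_eq (rle : List (Int × Int)) : ∀ (data : List Int) (off : Int),
    rle.foldl (fun (p : List Int × Int) vc => (p.1 ++ [vc.1] ++ [vc.2], p.2 + 2)) (data, off)
      = (data ++ rle.flatMap (fun vc => [vc.1, vc.2]), off + 2 * rle.length) := by
  induction rle with
  | nil => intro data off; simp
  | cons hd tl ih =>
      intro data off
      simp only [List.foldl_cons, List.flatMap_cons]
      rw [ih]
      simp only [Prod.mk.injEq]
      refine ⟨by simp, by simp [List.length_cons]; ring⟩

theorem outer_fold_eq (l : List (List (Int × Int))) : ∀ (offs data : List Int) (off : Int),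
    l.foldl
      (fun (st : List Int × List Int × Int) rle =>
        let offs := st.1 ++ [st.2.2]
        let inner := rle.foldl
          (fun (p : List Int × Int) vc => (p.1 ++ [vc.1] ++ [vc.2], p.2 + 2))
          (st.2.1, st.2.2)
        (offs, inner.1, inner.2))
      (offs, data, off)
      = (offs ++ ((l.map (fun rle => 2 * (rle.length : Int))).scanl (· + ·) off).dropLast,
         data ++ l.flatMap (fun rle => rle.flatMap (fun vc => [vc.1, vc.2])),
         off + (l.map (fun rle => 2 * (rle.length : Int))).sum) := by
  induction l with
  | nil => intro offs data off; simp
  | cons hd tl ih =>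
      intro offs data off
      simp only [List.foldl_cons, List.map_cons, List.scanl_cons, List.flatMap_cons]
      rw [inner_fold_eq, ih]
      simp only [Prod.mk.injEq]
      refine ⟨?_, ?_, ?_⟩
      · have hne : ((tl.map (fun rle => 2 * (rle.length : Int))).scanl (· + ·) (off + 2 * hd.length)) ≠ [] := by
          cases tl.map (fun rle => 2 * (rle.length : Int)) <;> simp [List.scanl]
        rw [List.dropLast_cons_of_ne_nil hne]
        simp [mul_comm]
      · simp
      · rw [List.sum_cons]; ring

-- ===== VERDICT (by name: the statement is the Claim_ definition above) =====
theorem flatten_rle_spec : Claim_equal_flatten_rle := by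
  intro rle_list _
  show flatten_rle rle_list = flatten_rle_alt rle_list
  simp only [flatten_rle, flatten_rle_alt]
  rw [outer_fold_eq]
  simp
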